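-- pv_equiv track=rewrite | github.com/kuznetsovvj/education | algorithms/codeforces/1810c.py | check
-- ===== SOURCE A (Python) =====
-- def check(seq, d, c):
--     t = len(seq) - len(set(seq))
--     seq = sorted(list(set(seq)))
--     # все удалим
--     res = c + len(seq) * d
--     c_accumulate = 0
--     for idx, item in enumerate(seq):
--         if idx == 0:
--             c_accumulate = item - 1
--         else:
--             c_accumulate += item - seq[idx-1] - 1
--         delta = (len(seq) - 1 - idx) * d
--         res = min(res, c_accumulate * c + delta)
--     if t > 0:
--         res += t * d
--     return res
-- ===== SOURCE B (Python) =====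
-- def check(seq, d, c):
--     # No sorting: for each distinct x, its rank (number of distinct elements
--     # below it) is computed directly by counting, which gives the same per-element
--     # cost as A's scan over the sorted list; the minimum is order-independent.
--     s = set(seq)
--     n = len(s)
--     best = c + n * d
--     for x in s:
--         r = sum(1 for y in s if y < x)
--         cost = (x - 1 - r) * c + (n - 1 - r) * d
--         if cost < best:
--             best = cost
--     return best + (len(seq) - n) * d
-- ===== Notes on version B (the rewrite author's own statement) =====
-- stated objective: alternative
-- what changed: B drops the sort-then-scan entirely: it iterates over the unordered set and, for each distinct element, counts the distinct elements below it (its rank) with an inner scan and forms the per-element cost from that rank; the minimum over the set is order-independent, so no sorted order and no running accumulator is needed, trading the O(n log n) sort for a quadratic pair of scans (slower on large inputs).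
import Mathlib
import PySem

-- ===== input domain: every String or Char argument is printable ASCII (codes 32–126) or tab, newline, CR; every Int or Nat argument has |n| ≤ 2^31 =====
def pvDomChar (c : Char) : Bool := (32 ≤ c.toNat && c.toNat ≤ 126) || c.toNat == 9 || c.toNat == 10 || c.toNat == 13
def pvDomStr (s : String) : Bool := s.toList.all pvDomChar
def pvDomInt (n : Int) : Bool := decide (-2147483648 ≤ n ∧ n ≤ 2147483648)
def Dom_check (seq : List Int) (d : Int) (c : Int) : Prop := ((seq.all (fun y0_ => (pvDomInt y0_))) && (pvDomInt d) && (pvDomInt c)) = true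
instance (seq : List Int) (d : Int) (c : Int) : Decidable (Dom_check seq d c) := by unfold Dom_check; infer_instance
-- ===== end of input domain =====

-- B replaces A's sort-then-scan by a sort-free quadratic pass: for each distinct element
-- it counts the distinct elements below it (its rank) and minimizes the per-element cost
-- directly over the unordered set; objective: alternative (same result, no sorting).


-- ===== PORT A =====
-- seq[idx-1] is ported as pyGetD: the branch only runs for idx ≥ 1, where idx-1 is in range,
-- so the total form is exact here.
def check (seq : List Int) (d : Int) (c : Int) : Int :=
  let t : Int := (seq.length : Int) - ((PySem.Set.ofList seq).length : Int)
  let s : List Int := PySem.List.sorted (PySem.Set.ofList seq) (fun x => x) false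
  let res0 : Int := c + (s.length : Int) * d
  let st := (PySem.List.enumerate s 0).foldl
    (fun (st : Int × Int) (p : Int × Int) =>
      let acc : Int :=
        if p.1 == 0 then p.2 - 1
        else st.1 + p.2 - PySem.List.pyGetD s (p.1 - 1) 0 - 1
      let delta : Int := ((s.length : Int) - 1 - p.1) * d
      (acc, min st.2 (acc * c + delta)))
    (0, res0)
  if t > 0 then st.2 + t * d else st.2

-- ===== PORT B =====
-- 'sum(1 for y in s if y < x)' is ported as the length of the filtered list (exact).
def check_alt (seq : List Int) (d : Int) (c : Int) : Int :=
  let s : List Int := PySem.Set.ofList seq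
  let n : Int := (s.length : Int)
  let best : Int := s.foldl
    (fun (best : Int) (x : Int) =>
      let r : Int := ((s.filter (fun y => decide (y < x))).length : Int)
      let cost : Int := (x - 1 - r) * c + (n - 1 - r) * d
      if cost < best then cost else best)
    (c + n * d)
  best + ((seq.length : Int) - n) * d

-- ===== PRECONDITION & SPEC =====
def Spec_check (seq : List Int) (d : Int) (c : Int) (out : Int) : Prop := out = check_alt seq d c
instance (seq : List Int) (d : Int) (c : Int) (out : Int) : Decidable (Spec_check seq d c out) := by unfold Spec_check; infer_instance

-- ===== CLAIM (what is proved, stated in full; the proofs are below) =====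
def Claim_equal_check : Prop := ∀ (seq : List Int) (d : Int) (c : Int), Dom_check seq d c → Spec_check seq d c (check seq d c)

-- ===== LEMMAS AND PROOFS =====

-- The loop body of A's port, abstracted over the sorted list s and costs d c.
def pvStep (s : List Int) (d c : Int) (st : Int × Int) (p : Int × Int) : Int × Int :=
  let acc : Int :=
    if p.1 == 0 then p.2 - 1
    else st.1 + p.2 - PySem.List.pyGetD s (p.1 - 1) 0 - 1
  let delta : Int := ((s.length : Int) - 1 - p.1) * d
  (acc, min st.2 (acc * c + delta))

-- A's per-index cost on the sorted list.
def pvCost (s : List Int) (d c : Int) (i : Int) : Int :=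
  (PySem.List.pyGetD s i 0 - 1 - i) * c + ((s.length : Int) - 1 - i) * d

-- B's per-element cost: rank computed by counting over the (unsorted) set list s.
def pvCostB (s : List Int) (d c : Int) (x : Int) : Int :=
  let r : Int := ((s.filter (fun y => decide (y < x))).length : Int)
  (x - 1 - r) * c + ((s.length : Int) - 1 - r) * d

-- Invariant of A's loop after processing the first k elements: the accumulator equals
-- s[k-1] - 1 - (k-1) (closed form, by telescoping) and res is the running min of the costs.
theorem pvLoop (s : List Int) (d c res0 : Int) :
    ∀ (k : Nat), k ≤ s.length →
      ((PySem.List.enumerate s 0).take k).foldl (pvStep s d c) (0, res0) =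
        ((if _ : k = 0 then 0 else PySem.List.pyGetD s ((k : Int) - 1) 0 - 1 - ((k : Int) - 1)),
         ((PySem.List.pyRange 0 (k : Int) 1).map (pvCost s d c)).foldl min res0) := by
  intro k hk
  induction k with
  | zero => simp
  | succ k ih =>
    have hk' : k ≤ s.length := Nat.le_of_succ_le hk
    have hklt : k < s.length := hk
    have htake : (PySem.List.enumerate s 0).take (k + 1) =
        (PySem.List.enumerate s 0).take k ++ [((k : Int), s[k])] := by
      rw [List.take_add_one]
      congr 1
      have : (PySem.List.enumerate s 0)[k]? = some ((0 : Int) + k, s[k]) := by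
        rw [PySem.List.getElem?_enumerate]
        simp [List.getElem?_eq_getElem hklt]
      simp [this]
    have hrange : PySem.List.pyRange 0 ((k : Int) + 1) 1 =
        PySem.List.pyRange 0 (k : Int) 1 ++ [(k : Int)] := by
      exact PySem.List.pyRange_one_succ_right (by positivity)
    have hget : PySem.List.pyGetD s (k : Int) 0 = s[k] := by
      rw [PySem.List.pyGetD_natCast s k 0, List.getD_eq_getElem s 0 hklt]
    rw [htake, List.foldl_append, ih hk']
    have hcast : ((k + 1 : Nat) : Int) = (k : Int) + 1 := by push_cast; ring
    rw [hcast, hrange, List.map_append, List.foldl_append]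
    rcases Nat.eq_zero_or_pos k with h0 | hpos
    · subst h0
      have h00 : PySem.List.pyGetD s 0 0 = s[0] := by simpa using hget
      simp [pvStep, pvCost, h00]
    · have hk0 : ((k : Int) == 0) = false := by simp; omega
      have hkp0 : ¬ (k + 1 = 0) := by omega
      have hne : ¬ (k = 0) := by omega
      have e : (k : Int) + 1 - 1 = (k : Int) := by ring
      simp only [pvStep, pvCost, List.map_cons, List.map_nil, List.foldl_cons, List.foldl_nil,
        dif_neg hkp0, dif_neg hne, hk0, Bool.false_eq_true, if_false, e, hget, Prod.mk.injEq]
      constructor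
      · ring
      · congr 1
        ring

-- The full loop: A's res is the running min of the per-index costs.
theorem pvLoopFull (s : List Int) (d c res0 : Int) :
    ((PySem.List.enumerate s 0).foldl (pvStep s d c) (0, res0)).2 =
      ((PySem.List.pyRange 0 (s.length : Int) 1).map (pvCost s d c)).foldl min res0 := by
  have h := pvLoop s d c res0 s.length le_rfl
  have htake : (PySem.List.enumerate s 0).take s.length = PySem.List.enumerate s 0 := by
    apply List.take_of_length_le
    simp [PySem.List.length_enumerate]
  rw [htake] at h
  rw [h]

-- Rank in a strictly increasing list: the elements below u[k] are exactly the first k.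
theorem pvRank (u : List Int) (h : u.Pairwise (· < ·)) (k : Nat) (hk : k < u.length) :
    (u.filter (fun y => decide (y < u[k]))).length = k := by
  have hpg := List.pairwise_iff_getElem.mp h
  have hsplit : u.take k ++ u.drop k = u := List.take_append_drop k u
  have hlt : (u.take k).length = k := by rw [List.length_take]; omega
  have htk : (u.take k).filter (fun y => decide (y < u[k])) = u.take k := by
    apply List.filter_eq_self.mpr
    intro a ha
    obtain ⟨i, hi, rfl⟩ : ∃ i, ∃ h : i < (u.take k).length, (u.take k)[i] = a := by
      simpa [List.mem_iff_getElem] using ha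
    have hik : i < k := by omega
    rw [List.getElem_take]
    exact decide_eq_true (hpg i k (by omega) hk hik)
  have hdk : (u.drop k).filter (fun y => decide (y < u[k])) = [] := by
    apply List.filter_eq_nil_iff.mpr
    intro a ha
    obtain ⟨i, hi, rfl⟩ : ∃ i, ∃ h : i < (u.drop k).length, (u.drop k)[i] = a := by
      simpa [List.mem_iff_getElem] using ha
    have hilen : i < u.length - k := by simpa [List.length_drop] using hi
    rw [List.getElem_drop]
    rcases Nat.eq_zero_or_pos i with h0 | hpos
    · subst h0; simp
    · have hlt2 : u[k] < u[k + i] := hpg k (k + i) (by omega) (by omega) (by omega)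
      simp only [decide_eq_true_eq]
      omega
  calc (u.filter (fun y => decide (y < u[k]))).length
      = ((u.take k ++ u.drop k).filter (fun y => decide (y < u[k]))).length := by rw [hsplit]
    _ = k := by
        rw [List.filter_append, htk, hdk, List.append_nil]
        exact hlt

theorem pvTnonneg (seq : List Int) : 0 ≤ (seq.length : Int) - ((PySem.Set.ofList seq).length : Int) := by
  have := PySem.Set.length_ofList_le seq
  omega

-- A's loop-body lambda is definitionally pvStep; B's is definitionally min of pvCostB.
theorem pvBfun (s : List Int) (d c : Int) :
    (fun (best : Int) (x : Int) =>
      let r : Int := ((s.filter (fun y => decide (y < x))).length : Int)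
      let cost : Int := (x - 1 - r) * c + ((s.length : Int) - 1 - r) * d
      if cost < best then cost else best)
      = fun (best : Int) (x : Int) => min best (pvCostB s d c x) := by
  funext best x
  simp only [pvCostB]
  rw [min_def]
  split_ifs <;> omega

-- The per-element costs over the set, listed in sorted order, are exactly A's per-index costs.
theorem pvMapEq (seq : List Int) (d c : Int) :
    (PySem.List.sorted (PySem.Set.ofList seq) (fun x => x) false).map
        (pvCostB (PySem.Set.ofList seq) d c) =
      (PySem.List.pyRange 0
          (((PySem.List.sorted (PySem.Set.ofList seq) (fun x => x) false).length : Nat) : Int) 1).map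
        (pvCost (PySem.List.sorted (PySem.Set.ofList seq) (fun x => x) false) d c) := by
  set s : List Int := PySem.Set.ofList seq with hs
  set u : List Int := PySem.List.sorted s (fun x => x) false with hu
  have hperm : u.Perm s := PySem.List.sorted_perm s _ _
  have hlen : u.length = s.length := hperm.length_eq
  have hsorted : u.Pairwise (· < ·) := by
    rw [hu, hs]; exact PySem.List.sorted_ofList_pairwise_lt seq
  apply List.ext_getElem
  · simp [PySem.List.length_pyRange_one]
  · intro k h1 h2
    have hku : k < u.length := by simpa using h1
    simp only [List.getElem_map]
    rw [PySem.List.getElem_pyRange_one]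
    have hr : ((s.filter (fun y => decide (y < u[k]))).length : Int) = (k : Int) := by
      have := (hperm.filter (fun y => decide (y < u[k]))).length_eq
      rw [← this, pvRank u hsorted k hku]
    have hg : PySem.List.pyGetD u ((k : Nat) : Int) 0 = u[k] := by
      rw [PySem.List.pyGetD_natCast u k 0, List.getD_eq_getElem u 0 hku]
    simp only [pvCostB, pvCost, zero_add, hr, hg, hlen]

-- ===== VERDICT (by name: the statement is the Claim_ definition above) =====
theorem check_spec : Claim_equal_check := by
  intro seq d c _
  unfold Spec_check check check_alt
  set s : List Int := PySem.Set.ofList seq with hs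
  set u : List Int := PySem.List.sorted s (fun x => x) false with hu
  set t : Int := (seq.length : Int) - (s.length : Int) with ht
  have hperm : u.Perm s := PySem.List.sorted_perm s _ _
  have hlen : u.length = s.length := hperm.length_eq
  have hA : ((PySem.List.enumerate u 0).foldl (pvStep u d c) (0, c + (u.length : Int) * d)).2 =
      ((PySem.List.pyRange 0 (u.length : Int) 1).map (pvCost u d c)).foldl min
        (c + (u.length : Int) * d) := pvLoopFull u d c _
  have hB : s.foldl
      (fun (best : Int) (x : Int) =>
        let r : Int := ((s.filter (fun y => decide (y < x))).length : Int)
        let cost : Int := (x - 1 - r) * c + ((s.length : Int) - 1 - r) * d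
        if cost < best then cost else best)
      (c + (s.length : Int) * d) =
      ((PySem.List.pyRange 0 (u.length : Int) 1).map (pvCost u d c)).foldl min
        (c + (u.length : Int) * d) := by
    rw [pvBfun, hlen.symm]
    calc s.foldl (fun best x => min best (pvCostB s d c x)) (c + (u.length : Int) * d)
        = (s.map (pvCostB s d c)).foldl min (c + (u.length : Int) * d) := by
          rw [List.foldl_map]
      _ = (u.map (pvCostB s d c)).foldl min (c + (u.length : Int) * d) :=
          ((hperm.map (pvCostB s d c)).foldl_eq _).symm
      _ = ((PySem.List.pyRange 0 (u.length : Int) 1).map (pvCost u d c)).foldl min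
            (c + (u.length : Int) * d) := by
          rw [hu, hs, pvMapEq seq d c]
  show (if t > 0
        then ((PySem.List.enumerate u 0).foldl (pvStep u d c) (0, c + (u.length : Int) * d)).2 + t * d
        else ((PySem.List.enumerate u 0).foldl (pvStep u d c) (0, c + (u.length : Int) * d)).2) = _
  rw [hA]
  show _ = (fun best => best + ((seq.length : Int) - (s.length : Int)) * d)
      (s.foldl _ (c + (s.length : Int) * d))
  simp only [hB, ← ht]
  by_cases hpos : t > 0
  · rw [if_pos hpos]
  · rw [if_neg hpos]
    have ht0 : t = 0 := by
      have h2 := pvTnonneg seq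
      rw [← hs] at h2
      omega
    rw [ht0, zero_mul, add_zero]
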